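-- pv_equiv track=rewrite | github.com/shiraily/exercise | atcoder/254.py | k_swap
-- ===== SOURCE A (Python) =====
-- def k_swap(arr, k):
--     n = len(arr)
--     sorted_arr = sorted(arr)
--     for i in range(len(arr)):
--         want = sorted_arr[i]
--         if arr[i] == want:
--             continue
--         can_swap = False
--         for j in range(1, ((n - i) // k) + 1):
--             tgt = i + j * k
--             if arr[tgt] == want:
--                 swap_to_tgt(arr, i, tgt, k)
--                 can_swap = True
--                 break
--         if not can_swap:
--             return "No"
--     return "Yes"
--
-- def swap(arr, i, k):
--     tmp = arr[i]
--     arr[i] = arr[i + k]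
--     arr[i + k] = tmp
--
-- def swap_to_tgt(arr, i, tgt, k):
--     n = (tgt - i) // k
--     for i in range(n):
--         swap(arr, tgt - k * (i + 1), k)
-- ===== SOURCE B (Python) =====
-- def k_swap(arr, k):
--     s = sorted(arr)
--     if k <= 0:
--         # no swap of non-positive distance is possible: sortable iff already sorted
--         return "Yes" if arr == s else "No"
--     return "Yes" if all(sorted(arr[r::k]) == s[r::k] for r in range(min(k, len(arr)))) else "No"
-- ===== Notes on version B (the rewrite author's own statement) =====
-- stated objective: alternative
-- what changed: A greedily selection-sorts the array in place, scanning for each position over positions i+j*k and bubbling the wanted element down with chains of distance-k swaps; B instead sorts each residue class mod k independently with the built-in sort and compares the class slices of arr against those of sorted(arr); B treats k <= 0 as 'no swap possible' (sortable iff already sorted), matching A wherever A returns.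
import Mathlib
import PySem

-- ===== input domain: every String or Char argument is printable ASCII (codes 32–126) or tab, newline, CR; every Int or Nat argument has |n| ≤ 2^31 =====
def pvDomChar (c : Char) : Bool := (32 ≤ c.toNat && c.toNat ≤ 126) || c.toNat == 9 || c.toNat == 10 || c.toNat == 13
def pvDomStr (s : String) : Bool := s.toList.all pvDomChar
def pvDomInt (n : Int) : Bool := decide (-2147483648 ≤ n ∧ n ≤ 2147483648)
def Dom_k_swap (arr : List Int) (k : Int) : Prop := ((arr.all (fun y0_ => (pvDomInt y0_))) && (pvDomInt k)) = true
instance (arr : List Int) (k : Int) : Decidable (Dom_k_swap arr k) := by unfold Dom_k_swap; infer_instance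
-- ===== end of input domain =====

-- B replaces A's in-place greedy distance-k selection sort by sorting each residue class
-- mod k independently and comparing class slices with sorted(arr) (a different algorithm
-- of similar measured cost).  A mutates its argument list in place; B does not — the
-- equivalence proved here is about the RETURN value only.


-- ===== PORT A =====
-- swap(arr, i, k): tmp = arr[i]; arr[i] = arr[i+k]; arr[i+k] = tmp.
-- Python raises IndexError on an out-of-range index; the total forms pyGetD/pySetD are
-- used — every call is in range on inputs admitted by Pre_k_swap.
def pySwap (arr : List Int) (i k : Int) : List Int :=
  let tmp := PySem.List.pyGetD arr i 0
  let arr1 := PySem.List.pySetD arr i (PySem.List.pyGetD arr (i + k) 0)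
  PySem.List.pySetD arr1 (i + k) tmp

-- swap_to_tgt(arr, i, tgt, k)
def swapToTgt (arr : List Int) (i tgt k : Int) : List Int :=
  (PySem.List.pyRange 0 (PySem.Int.floordiv (tgt - i) k) 1).foldl
    (fun a m => pySwap a (tgt - k * (m + 1)) k) arr

-- the inner 'for j in range(1, ((n - i) // k) + 1)' scan: first tgt = i + j*k with
-- arr[tgt] == want.  Python raises IndexError when it reads arr[len(arr)] (reached only
-- on inputs excluded by Pre_k_swap); the total read returns the default there.
def kSwapFind (arr : List Int) (want i k : Int) : List Int → Option Int
  | [] => none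
  | j :: js =>
    let tgt := i + j * k
    if PySem.List.pyGetD arr tgt 0 = want then some tgt else kSwapFind arr want i k js

-- the outer 'for i in range(len(arr))' loop with the mutable arr and early return "No"
def kSwapGo (k n : Int) (s : List Int) (arr : List Int) (i : Nat) : String :=
  if h : (i : Int) < n then
    let want := PySem.List.pyGetD s (i : Int) 0
    if PySem.List.pyGetD arr (i : Int) 0 = want then
      kSwapGo k n s arr (i + 1)
    else
      match kSwapFind arr want (i : Int) k
          (PySem.List.pyRange 1 (PySem.Int.floordiv (n - (i : Int)) k + 1) 1) with
      | some tgt => kSwapGo k n s (swapToTgt arr (i : Int) tgt k) (i + 1)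
      | none => "No"
  else "Yes"
termination_by (n - (i : Int)).toNat
decreasing_by all_goals (clear_value want; push_cast; omega)

def k_swap (arr : List Int) (k : Int) : String :=
  kSwapGo k (arr.length : Int) (PySem.List.sorted arr (fun x => x) false) arr 0

-- ===== PORT B =====
def k_swap_alt (arr : List Int) (k : Int) : String :=
  let s := PySem.List.sorted arr (fun x => x) false
  if k ≤ 0 then
    if arr = s then "Yes" else "No"
  else
    -- slice? is total here (k ≠ 0), whence the .getD []
    if (PySem.List.pyRange 0 (min k (arr.length : Int)) 1).all (fun r =>
        PySem.List.sorted ((PySem.List.slice? arr (some r) none k).getD []) (fun x => x) false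
          == (PySem.List.slice? s (some r) none k).getD []) then "Yes" else "No"

-- ===== PRECONDITION & SPEC =====
-- number of positions j < m with j ≡ r (mod K) and xs[j] = v
def cntK (xs : List Int) (K r : Nat) (v : Int) (m : Nat) : Nat :=
  (List.range m).countP (fun j => j % K == r && xs.getD j 0 == v)

-- position i of sorted(arr) needs more copies of its value in its residue class than arr has
def failsB (arr s : List Int) (K : Nat) (i : Nat) : Bool :=
  cntK arr K (i % K) (s.getD i 0) arr.length < cntK s K (i % K) (s.getD i 0) (i + 1)

-- Pre_ excludes exactly the inputs on which the Python A raises: ZeroDivisionError when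
-- k = 0 and arr is unsorted, and IndexError (the inner scan reads arr[len(arr)]) when
-- 0 < k and k divides len(arr) - i at the first position i whose residue class mod k
-- lacks the needed value.  A returns normally on every other input.
def Pre_k_swap (arr : List Int) (k : Int) : Prop :=
  (k = 0 → PySem.List.sorted arr (fun x => x) false = arr) ∧
  (0 < k → ∀ i < arr.length,
    (failsB arr (PySem.List.sorted arr (fun x => x) false) k.toNat i = true ∧
     ∀ i' < i, failsB arr (PySem.List.sorted arr (fun x => x) false) k.toNat i' = false) →
    ¬ (k ∣ ((arr.length : Int) - (i : Int))))
instance (arr : List Int) (k : Int) : Decidable (Pre_k_swap arr k) := by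
  unfold Pre_k_swap; infer_instance

def pvWitness_k_swap : List Int × Int := ([2, 1], 1)

def Spec_k_swap (arr : List Int) (k : Int) (out : String) : Prop := out = k_swap_alt arr k
instance (arr : List Int) (k : Int) (out : String) : Decidable (Spec_k_swap arr k out) := by
  unfold Spec_k_swap; infer_instance

-- ===== CLAIM (what is proved, stated in full; the proofs are below) =====
def Claim_equal_k_swap : Prop :=
  ∀ (arr : List Int) (k : Int), Dom_k_swap arr k → Pre_k_swap arr k →
    Spec_k_swap arr k (k_swap arr k)
-- ===== LEMMAS AND PROOFS =====

lemma countP_range_update (n p : Nat) (hp : p < n) (f g : Nat → Bool)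
    (hfg : ∀ j, j ≠ p → f j = g j) :
    (List.range n).countP f + (if g p then 1 else 0)
      = (List.range n).countP g + (if f p then 1 else 0) := by
  induction n with
  | zero => omega
  | succ n ih =>
    rw [List.range_succ, List.countP_append, List.countP_append]
    by_cases hpn : p = n
    · subst hpn
      have hcong : (List.range p).countP f = (List.range p).countP g :=
        List.countP_congr (fun j hj => by
          have : j ≠ p := by have := List.mem_range.1 hj; omega
          rw [hfg j this])
      simp [List.countP_cons]
      rcases Bool.eq_false_or_eq_true (f p) with h1 | h1 <;>
        rcases Bool.eq_false_or_eq_true (g p) with h2 | h2 <;>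
          simp [h1, h2, hcong] <;> omega
    · have hlt : p < n := by omega
      have := ih hlt
      have hfn : f n = g n := hfg n (by omega)
      simp [List.countP_cons, hfn] at *
      rcases Bool.eq_false_or_eq_true (g n) with h2 | h2 <;> simp [h2] <;> omega

lemma cntK_split (xs : List Int) (K r : Nat) (v : Int) (m n : Nat) (h : m ≤ n) :
    cntK xs K r v n
      = cntK xs K r v m + (List.range (n - m)).countP
          (fun t => (m + t) % K == r && xs.getD (m + t) 0 == v) := by
  obtain ⟨d, rfl⟩ : ∃ d, n = m + d := ⟨n - m, by omega⟩
  unfold cntK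
  rw [List.range_add, List.countP_append, List.countP_map, Nat.add_sub_cancel_left]
  rfl

lemma cntK_mono (xs : List Int) (K r : Nat) (v : Int) {m m' : Nat} (h : m ≤ m') :
    cntK xs K r v m ≤ cntK xs K r v m' := by
  rw [cntK_split xs K r v m m' h]; omega

lemma cntK_succ (xs : List Int) (K r : Nat) (v : Int) (m : Nat) :
    cntK xs K r v (m + 1)
      = cntK xs K r v m + (if m % K = r ∧ xs.getD m 0 = v then 1 else 0) := by
  unfold cntK
  rw [List.range_succ, List.countP_append]
  by_cases h1 : m % K = r <;> by_cases h2 : xs.getD m 0 = v <;>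
    simp [List.countP_cons, h1, h2]

lemma cntK_exists (xs : List Int) (K r : Nat) (v : Int) (m n : Nat) (hmn : m ≤ n)
    (h : cntK xs K r v m < cntK xs K r v n) :
    ∃ j, m ≤ j ∧ j < n ∧ j % K = r ∧ xs.getD j 0 = v := by
  rw [cntK_split xs K r v m n hmn] at h
  have hpos : 0 < (List.range (n - m)).countP
      (fun t => (m + t) % K == r && xs.getD (m + t) 0 == v) := by omega
  rw [List.countP_pos_iff] at hpos
  obtain ⟨t, ht, hpt⟩ := hpos
  have ht' := List.mem_range.1 ht
  simp only [Bool.and_eq_true, beq_iff_eq] at hpt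
  exact ⟨m + t, by omega, by omega, hpt.1, hpt.2⟩

lemma cntK_stable (xs : List Int) (K r : Nat) (v : Int) (m n : Nat) (hmn : m ≤ n)
    (h : ∀ j, m ≤ j → j < n → ¬ (j % K = r ∧ xs.getD j 0 = v)) :
    cntK xs K r v n = cntK xs K r v m := by
  rw [cntK_split xs K r v m n hmn]
  have : (List.range (n - m)).countP
      (fun t => (m + t) % K == r && xs.getD (m + t) 0 == v) = 0 := by
    rw [List.countP_eq_zero]
    intro t ht
    have ht' := List.mem_range.1 ht
    simp only [Bool.and_eq_true, beq_iff_eq, not_and]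
    intro h1 h2
    exact absurd ⟨h1, h2⟩ (h (m + t) (by omega) (by omega))
  omega

lemma getD_take (c : List Int) (m j : Nat) (hj : j < m) :
    (c.take m).getD j 0 = c.getD j 0 := by
  rcases lt_or_ge j c.length with h | h
  · rw [List.getD_eq_getElem _ _ (by simp; omega), List.getD_eq_getElem _ _ h]
    simp [List.getElem_take]
  · rw [List.getD_eq_default _ _ (by simp; omega), List.getD_eq_default _ _ h]

lemma cntK_prefix (c s : List Int) (K r : Nat) (v : Int) (m : Nat)
    (h : c.take m = s.take m) :
    cntK c K r v m = cntK s K r v m := by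
  unfold cntK
  apply List.countP_congr
  intro j hj
  have hj' := List.mem_range.1 hj
  rw [← getD_take c m j hj', h, getD_take s m j hj']

lemma getD_set (l : List Int) (p : Nat) (a : Int) (j : Nat) (hp : p < l.length) :
    (l.set p a).getD j 0 = if j = p then a else l.getD j 0 := by
  by_cases h : j = p
  · subst h; rw [List.getD_eq_getElem _ _ (by simpa using hp)]
    simp [List.getElem_set_self]
  · simp only [h, if_false]
    rcases lt_or_ge j l.length with h2 | h2
    · rw [List.getD_eq_getElem _ _ (by simpa using h2), List.getD_eq_getElem _ _ h2]
      rw [List.getElem_set_ne (by omega)]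
    · rw [List.getD_eq_default _ _ (by simpa using h2), List.getD_eq_default _ _ h2]

lemma cntK_set (xs : List Int) (K r : Nat) (v a : Int) (p : Nat) (hp : p < xs.length) :
    cntK (xs.set p a) K r v xs.length + (if p % K = r ∧ xs.getD p 0 = v then 1 else 0)
      = cntK xs K r v xs.length + (if p % K = r ∧ a = v then 1 else 0) := by
  unfold cntK
  have := countP_range_update xs.length p hp
    (fun j => j % K == r && (xs.set p a).getD j 0 == v)
    (fun j => j % K == r && xs.getD j 0 == v)
    (fun j hj => by simp [List.getElem?_set, Ne.symm hj])
  by_cases h1 : p % K = r <;> by_cases h2 : xs.getD p 0 = v <;> by_cases h3 : a = v <;>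
    simp [h1, h2, h3, List.getElem?_set, hp] at this ⊢ <;> omega


def tagL (xs : List Int) (K : Nat) : List (Nat × Int) :=
  (List.range xs.length).map (fun j => (j % K, xs.getD j 0))

lemma count_tagL (xs : List Int) (K r : Nat) (v : Int) :
    Multiset.count ((r, v) : Nat × Int) (↑(tagL xs K) : Multiset (Nat × Int))
      = cntK xs K r v xs.length := by
  simp only [Multiset.coe_count]
  unfold tagL cntK
  rw [@List.count_eq_countP _ instBEqOfDecidableEq, List.countP_map]
  apply List.countP_congr
  intro j hj
  rw [Bool.eq_iff_iff]
  simp [Prod.ext_iff]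

lemma cntK_high (xs : List Int) (K r : Nat) (v : Int) (m : Nat) (hK : 0 < K) (hr : K ≤ r) :
    cntK xs K r v m = 0 := by
  unfold cntK
  rw [List.countP_eq_zero]
  intro j hj
  have : j % K < K := Nat.mod_lt _ hK
  simp only [Bool.and_eq_true, beq_iff_eq, not_and]
  intro h
  omega

lemma cnt_eq_of_le (arr s : List Int) (K : Nat) (hlen : s.length = arr.length)
    (hle : ∀ r v, cntK s K r v s.length ≤ cntK arr K r v arr.length) :
    ∀ r v, cntK s K r v s.length = cntK arr K r v arr.length := by
  have hms : (tagL s K : Multiset (Nat × Int)) ≤ (tagL arr K : Multiset (Nat × Int)) := by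
    rw [Multiset.le_iff_count]
    rintro ⟨r, v⟩
    rw [count_tagL, count_tagL]
    exact hle r v
  have hcard : (tagL arr K : Multiset (Nat × Int)).card ≤ (tagL s K : Multiset (Nat × Int)).card := by
    simp [tagL, hlen]
  have heq := Multiset.eq_of_le_of_card_le hms hcard
  intro r v
  rw [← count_tagL, ← count_tagL, heq]

lemma pySwap_eq (c : List Int) (k : Int) (hk : 0 < k) (p : Nat) :
    pySwap c (p : Int) k
      = (c.set p (c.getD (p + k.toNat) 0)).set (p + k.toNat) (c.getD p 0) := by
  have hcast : (p : Int) + k = ((p + k.toNat : Nat) : Int) := by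
    push_cast
    omega
  unfold pySwap
  rw [hcast]
  simp only [PySem.List.pySetD_natCast, PySem.List.pyGetD_natCast]

lemma pySwap_spec (c : List Int) (k : Int) (hk : 0 < k) (p : Nat)
    (hp : p + k.toNat < c.length) :
    (pySwap c (p : Int) k).length = c.length ∧
    (∀ r v, cntK (pySwap c (p : Int) k) k.toNat r v c.length
        = cntK c k.toNat r v c.length) ∧
    (∀ m, m ≤ p → (pySwap c (p : Int) k).take m = c.take m) ∧
    (pySwap c (p : Int) k).getD p 0 = c.getD (p + k.toNat) 0 := by
  have hKpos : 0 < k.toNat := by omega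
  have hplen : p < c.length := by omega
  have hpq : p ≠ p + k.toNat := by omega
  rw [pySwap_eq c k hk p]
  refine ⟨by simp, ?_, ?_, ?_⟩
  · intro r v
    have E1 := cntK_set c k.toNat r v (c.getD (p + k.toNat) 0) p hplen
    have E2 := cntK_set (c.set p (c.getD (p + k.toNat) 0)) k.toNat r v (c.getD p 0)
      (p + k.toNat) (by simpa using hp)
    rw [List.length_set] at E2
    rw [getD_set c p _ (p + k.toNat) hplen, if_neg (Ne.symm hpq)] at E2
    rw [Nat.add_mod_right] at E2
    split_ifs at E1 E2 <;> omega
  · intro m hm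
    rw [List.take_set_of_le (by omega : m ≤ p + k.toNat),
      List.take_set_of_le (by omega : m ≤ p)]
  · rw [getD_set _ (p + k.toNat) _ p (by simpa using hp), if_neg hpq,
      getD_set c p _ p hplen, if_pos rfl]

lemma swapToTgt_nil (c : List Int) (i k : Int) (hk : k ≠ 0) :
    swapToTgt c i i k = c := by
  unfold swapToTgt
  rw [sub_self]
  have : PySem.Int.floordiv 0 k = 0 := by
    unfold PySem.Int.floordiv
    exact Int.zero_fdiv k
  rw [this, PySem.List.pyRange_one_eq_nil le_rfl, List.foldl_nil]

lemma swapToTgt_succ (c : List Int) (i k : Int) (hk : 0 < k) (m : Nat) :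
    swapToTgt c i (i + ((m : Int) + 1) * k) k
      = pySwap (swapToTgt c (i + k) (i + ((m : Int) + 1) * k) k) i k := by
  unfold swapToTgt
  have h1 : PySem.Int.floordiv (i + ((m : Int) + 1) * k - i) k = (m : Int) + 1 := by
    unfold PySem.Int.floordiv
    rw [show i + ((m : Int) + 1) * k - i = ((m : Int) + 1) * k by ring]
    exact Int.mul_fdiv_cancel _ (by omega)
  have h2 : PySem.Int.floordiv (i + ((m : Int) + 1) * k - (i + k)) k = (m : Int) := by
    unfold PySem.Int.floordiv
    rw [show i + ((m : Int) + 1) * k - (i + k) = (m : Int) * k by ring]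
    exact Int.mul_fdiv_cancel _ (by omega)
  rw [h1, h2, PySem.List.pyRange_one_succ_right (by omega : (0 : Int) ≤ (m : Int)),
    List.foldl_append]
  simp only [List.foldl_cons, List.foldl_nil]
  rw [show i + ((m : Int) + 1) * k - k * ((m : Int) + 1) = i by ring]

lemma swapToTgt_spec (k : Int) (hk : 0 < k) :
    ∀ (m : Nat) (c : List Int) (i : Nat), i + (m + 1) * k.toNat < c.length →
    (swapToTgt c (i : Int) ((i : Int) + ((m : Int) + 1) * k) k).length = c.length ∧
    (∀ r v, cntK (swapToTgt c (i : Int) ((i : Int) + ((m : Int) + 1) * k) k) k.toNat r v c.length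
        = cntK c k.toNat r v c.length) ∧
    (swapToTgt c (i : Int) ((i : Int) + ((m : Int) + 1) * k) k).take i = c.take i ∧
    (swapToTgt c (i : Int) ((i : Int) + ((m : Int) + 1) * k) k).getD i 0
        = c.getD (i + (m + 1) * k.toNat) 0 := by
  intro m
  induction m with
  | zero =>
    intro c i hlen
    rw [swapToTgt_succ c (i : Int) k hk 0]
    have harg : (i : Int) + k = ((i + k.toNat : Nat) : Int) := by push_cast; ring_nf; omega
    have harg2 : (i : Int) + (((0 : Nat) : Int) + 1) * k = ((i + k.toNat : Nat) : Int) := by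
      push_cast; ring_nf; omega
    rw [harg, harg2, swapToTgt_nil c _ k (by omega)]
    have := pySwap_spec c k hk i (by omega)
    refine ⟨this.1, this.2.1, this.2.2.1 _ le_rfl, by simpa using this.2.2.2⟩
  | succ m ih =>
    intro c i hlen
    rw [swapToTgt_succ c (i : Int) k hk (m + 1)]
    have harg : (i : Int) + k = ((i + k.toNat : Nat) : Int) := by push_cast; ring_nf; omega
    have harg2 : (i : Int) + (((m + 1 : Nat) : Int) + 1) * k
        = ((i + k.toNat : Nat) : Int) + ((m : Int) + 1) * k := by push_cast; ring_nf; omega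
    rw [harg, harg2]
    have hmul : (m + 1 + 1) * k.toNat = (m + 1) * k.toNat + k.toNat := by ring
    have hlen' : (i + k.toNat) + (m + 1) * k.toNat < c.length := by omega
    obtain ⟨L1, C1, T1, G1⟩ := ih c (i + k.toNat) hlen'
    have hswap := pySwap_spec (swapToTgt c ((i + k.toNat : Nat) : Int)
      (((i + k.toNat : Nat) : Int) + ((m : Int) + 1) * k) k) k hk i
      (by rw [L1]; omega)
    obtain ⟨L2, C2, T2, G2⟩ := hswap
    rw [L1] at L2 C2
    refine ⟨L2, ?_, ?_, ?_⟩
    · intro r v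
      rw [C2, C1]
    · rw [T2 i le_rfl]
      calc (swapToTgt c ((i + k.toNat : Nat) : Int)
            (((i + k.toNat : Nat) : Int) + ((m : Int) + 1) * k) k).take i
          = ((swapToTgt c ((i + k.toNat : Nat) : Int)
            (((i + k.toNat : Nat) : Int) + ((m : Int) + 1) * k) k).take (i + k.toNat)).take i := by
            rw [List.take_take]
            congr 1
            omega
        _ = (c.take (i + k.toNat)).take i := by rw [T1]
        _ = c.take i := by
            rw [List.take_take]
            congr 1
            omega
    · rw [G2, G1]
      congr 1
      omega

lemma kSwapFind_none (c : List Int) (want i k : Int) (js : List Int)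
    (h : ∀ j ∈ js, PySem.List.pyGetD c (i + j * k) 0 ≠ want) :
    kSwapFind c want i k js = none := by
  induction js with
  | nil => rfl
  | cons j js ih =>
    unfold kSwapFind
    rw [if_neg (h j (by simp))]
    exact ih (fun j' hj' => h j' (by simp [hj']))

lemma kSwapFind_first (c : List Int) (want i k : Int) :
    ∀ (js : List Int), js.Pairwise (· < ·) →
    ∀ j₀ ∈ js, PySem.List.pyGetD c (i + j₀ * k) 0 = want →
    ∃ j ∈ js, j ≤ j₀ ∧ kSwapFind c want i k js = some (i + j * k) ∧
      PySem.List.pyGetD c (i + j * k) 0 = want := by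
  intro js
  induction js with
  | nil => intro _ j₀ h; simp at h
  | cons j js ih =>
    intro hpw j₀ hj₀ hm
    by_cases hj : PySem.List.pyGetD c (i + j * k) 0 = want
    · refine ⟨j, by simp, ?_, ?_, hj⟩
      · rcases List.mem_cons.1 hj₀ with h | h
        · omega
        · exact le_of_lt (List.rel_of_pairwise_cons hpw h)
      · unfold kSwapFind
        rw [if_pos hj]
    · have hj₀' : j₀ ∈ js := by
        rcases List.mem_cons.1 hj₀ with h | h
        · exact absurd (h ▸ hm) hj
        · exact h
      obtain ⟨j', hj', hle, hres, hval⟩ := ih (List.Pairwise.of_cons hpw) j₀ hj₀' hm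
      refine ⟨j', by simp [hj'], hle, ?_, hval⟩
      unfold kSwapFind
      rw [if_neg hj]
      exact hres

lemma kSwapGo_self (k n : Int) (s : List Int) : ∀ (f i : Nat), (n - (i : Int)).toNat ≤ f →
    kSwapGo k n s s i = "Yes" := by
  intro f
  induction f with
  | zero =>
    intro i hf
    unfold kSwapGo
    rw [dif_neg (by omega)]
  | succ f ih =>
    intro i hf
    unfold kSwapGo
    by_cases h : (i : Int) < n
    · rw [dif_pos h, if_pos rfl]
      exact ih (i + 1) (by omega)
    · rw [dif_neg h]

lemma cntK_witness (xs : List Int) (K r : Nat) (v : Int) (m n j : Nat)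
    (hm : m ≤ j) (hj : j < n) (h1 : j % K = r) (h2 : xs.getD j 0 = v) :
    cntK xs K r v m < cntK xs K r v n := by
  have ha : cntK xs K r v m ≤ cntK xs K r v j := cntK_mono xs K r v hm
  have hb : cntK xs K r v (j + 1) = cntK xs K r v j + 1 := by
    rw [cntK_succ, if_pos ⟨h1, h2⟩]
  have hc : cntK xs K r v (j + 1) ≤ cntK xs K r v n := cntK_mono xs K r v (by omega)
  omega

lemma take_succ_eq (c s : List Int) (i : Nat) (hic : i < c.length) (his : i < s.length)
    (htake : c.take i = s.take i) (hval : c.getD i 0 = s.getD i 0) :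
    c.take (i + 1) = s.take (i + 1) := by
  rw [List.take_succ, List.take_succ, htake]
  congr 1
  rw [List.getElem?_eq_getElem hic, List.getElem?_eq_getElem his]
  rw [List.getD_eq_getElem c 0 hic, List.getD_eq_getElem s 0 his] at hval
  simp [hval]

lemma kSwapGo_neg (k : Int) (hk : k < 0) (n : Int) (s : List Int) :
    ∀ (f i : Nat) (c : List Int), (n - (i : Int)).toNat ≤ f →
    kSwapGo k n s c i
      = if (∀ j < n.toNat, i ≤ j → c.getD j 0 = s.getD j 0) then "Yes" else "No" := by
  intro f
  induction f with
  | zero =>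
    intro i c hf
    unfold kSwapGo
    rw [dif_neg (by omega), if_pos (fun j hj hij => by omega)]
  | succ f ih =>
    intro i c hf
    unfold kSwapGo
    by_cases hi : (i : Int) < n
    · rw [dif_pos hi]
      simp only [PySem.List.pyGetD_natCast]
      by_cases hci : c.getD i 0 = s.getD i 0
      · rw [if_pos hci, ih (i + 1) c (by omega)]
        have hiff : (∀ j < n.toNat, i + 1 ≤ j → c.getD j 0 = s.getD j 0)
            ↔ (∀ j < n.toNat, i ≤ j → c.getD j 0 = s.getD j 0) := by
          constructor
          · intro H j hj hij
            rcases Nat.eq_or_lt_of_le hij with h | h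
            · exact h ▸ hci
            · exact H j hj h
          · intro H j hj hij
            exact H j hj (by omega)
        simp only [hiff]
      · rw [if_neg hci]
        have hM : PySem.Int.floordiv (n - (i : Int)) k + 1 ≤ 1 := by
          have h1 : 0 < n - (i : Int) := by omega
          have h2 := PySem.Int.floordiv_mul_add_mod (n - (i : Int)) k
          have h3 := (PySem.Int.mod_neg_bounds (a := n - (i : Int)) hk).1
          have h4 := (PySem.Int.mod_neg_bounds (a := n - (i : Int)) hk).2
          by_contra hcon
          push_neg at hcon
          have h5 : 1 ≤ PySem.Int.floordiv (n - (i : Int)) k := by omega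
          nlinarith
        rw [PySem.List.pyRange_one_eq_nil (by omega), kSwapFind_none _ _ _ _ _ (by simp)]
        rw [if_neg ?_]
        intro H
        exact hci (H i (by omega) le_rfl)
    · rw [dif_neg hi, if_pos (fun j hj hij => by omega)]

lemma kSwapGo_spec (k : Int) (hk : 0 < k) (arr s : List Int) (hlen : s.length = arr.length)
    (hpre : ∀ i < arr.length,
      (failsB arr s k.toNat i = true ∧ ∀ i' < i, failsB arr s k.toNat i' = false) →
      ¬ (k ∣ ((arr.length : Int) - (i : Int)))) :
    ∀ (f i : Nat) (c : List Int), arr.length - i ≤ f → c.length = arr.length →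
      (∀ r v, cntK c k.toNat r v c.length = cntK arr k.toNat r v arr.length) →
      c.take i = s.take i →
      (∀ i' < i, failsB arr s k.toNat i' = false) →
      kSwapGo k (arr.length : Int) s c i
        = if (∀ i'' < arr.length, failsB arr s k.toNat i'' = false) then "Yes" else "No" := by
  have hkk : ((k.toNat : Nat) : Int) = k := Int.toNat_of_nonneg (by omega)
  have hKpos : 0 < k.toNat := by omega
  intro f
  induction f with
  | zero =>
    intro i c hf hclen hcnt htake hprev
    unfold kSwapGo
    rw [dif_neg (by omega), if_pos (fun i'' hi'' => hprev i'' (by omega))]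
  | succ f ih =>
    intro i c hf hclen hcnt htake hprev
    by_cases hi : i < arr.length
    case neg =>
      unfold kSwapGo
      rw [dif_neg (by omega), if_pos (fun i'' hi'' => hprev i'' (by omega))]
    case pos =>
    unfold kSwapGo
    rw [dif_pos (by omega : ((i : Nat) : Int) < (arr.length : Int))]
    simp only [PySem.List.pyGetD_natCast]
    by_cases hfail : failsB arr s k.toNat i = true
    · -- the first failing position: A answers "No"
      have hlt : cntK arr k.toNat (i % k.toNat) (s.getD i 0) arr.length
          < cntK s k.toNat (i % k.toNat) (s.getD i 0) (i + 1) := by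
        simpa [failsB] using hfail
      have hnone : ∀ j, i ≤ j → j < arr.length →
          ¬ (j % k.toNat = i % k.toNat ∧ c.getD j 0 = s.getD i 0) := by
        intro j hij hjn ⟨hjr, hjv⟩
        have h1 : cntK c k.toNat (i % k.toNat) (s.getD i 0) i
            < cntK c k.toNat (i % k.toNat) (s.getD i 0) c.length :=
          cntK_witness c _ _ _ i c.length j hij (by omega) hjr hjv
        have h2 : cntK c k.toNat (i % k.toNat) (s.getD i 0) i
            = cntK s k.toNat (i % k.toNat) (s.getD i 0) i := cntK_prefix c s _ _ _ i htake
        have h3 : cntK s k.toNat (i % k.toNat) (s.getD i 0) (i + 1)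
            = cntK s k.toNat (i % k.toNat) (s.getD i 0) i + 1 := by
          rw [cntK_succ, if_pos ⟨rfl, rfl⟩]
        have h4 := hcnt (i % k.toNat) (s.getD i 0)
        omega
      have hndvd : ¬ (k ∣ ((arr.length : Int) - (i : Int))) :=
        hpre i hi ⟨hfail, hprev⟩
      have hMle : PySem.Int.floordiv ((arr.length : Int) - (i : Int)) k * k
          ≤ (arr.length : Int) - (i : Int) := by
        rw [← PySem.Int.le_floordiv_iff_mul_le hk]
      have hMlt : PySem.Int.floordiv ((arr.length : Int) - (i : Int)) k * k
          < (arr.length : Int) - (i : Int) := by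
        rcases lt_or_eq_of_le hMle with h | h
        · exact h
        · exact absurd ⟨PySem.Int.floordiv ((arr.length : Int) - (i : Int)) k,
            by rw [mul_comm]; exact h.symm⟩ hndvd
      have hci : ¬ (c.getD i 0 = s.getD i 0) := by
        intro hcon
        exact hnone i le_rfl hi ⟨rfl, hcon⟩
      rw [if_neg hci]
      have hscan : ∀ j ∈ PySem.List.pyRange 1
          (PySem.Int.floordiv ((arr.length : Int) - (i : Int)) k + 1) 1,
          PySem.List.pyGetD c ((i : Int) + j * k) 0 ≠ s.getD i 0 := by
        intro j hj
        rw [PySem.List.mem_pyRange_one] at hj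
        have hjM : j ≤ PySem.Int.floordiv ((arr.length : Int) - (i : Int)) k := by omega
        have hjk : j * k ≤ PySem.Int.floordiv ((arr.length : Int) - (i : Int)) k * k :=
          mul_le_mul_of_nonneg_right hjM (by omega)
        have hpos : (0 : Int) ≤ (i : Int) + j * k := by nlinarith
        have hposn : (i : Int) + j * k < (arr.length : Int) := by omega
        -- as a Nat position
        have hjnat : (i : Int) + j * k = ((i + j.toNat * k.toNat : Nat) : Int) := by
          push_cast
          rw [Int.toNat_of_nonneg (by omega : (0:Int) ≤ j), hkk]
        rw [hjnat, PySem.List.pyGetD_natCast]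
        have hjn' : i + j.toNat * k.toNat < arr.length := by omega
        intro hcon
        exact hnone (i + j.toNat * k.toNat) (by omega) hjn'
          ⟨by rw [Nat.add_mul_mod_self_right], hcon⟩
      rw [kSwapFind_none _ _ _ _ _ hscan]
      rw [if_neg (fun H => by have := H i hi; rw [hfail] at this; exact absurd this (by simp))]
    · -- position i can be fixed: A continues
      have hge : cntK s k.toNat (i % k.toNat) (s.getD i 0) (i + 1)
          ≤ cntK arr k.toNat (i % k.toNat) (s.getD i 0) arr.length := by
        have := hfail
        simp [failsB] at this
        exact this
      have h3 : cntK s k.toNat (i % k.toNat) (s.getD i 0) (i + 1)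
          = cntK s k.toNat (i % k.toNat) (s.getD i 0) i + 1 := by
        rw [cntK_succ, if_pos ⟨rfl, rfl⟩]
      have h2 : cntK c k.toNat (i % k.toNat) (s.getD i 0) i
          = cntK s k.toNat (i % k.toNat) (s.getD i 0) i := cntK_prefix c s _ _ _ i htake
      have h4 := hcnt (i % k.toNat) (s.getD i 0)
      have hlt : cntK c k.toNat (i % k.toNat) (s.getD i 0) i
          < cntK c k.toNat (i % k.toNat) (s.getD i 0) c.length := by omega
      obtain ⟨j, hij, hjn, hjr, hjv⟩ :=
        cntK_exists c k.toNat (i % k.toNat) (s.getD i 0) i c.length (by omega) hlt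
      have hprev' : ∀ i' < i + 1, failsB arr s k.toNat i' = false := by
        intro i' hi'
        rcases Nat.lt_succ_iff_lt_or_eq.1 hi' with h | h
        · exact hprev i' h
        · subst h
          simpa using hfail
      by_cases hci : c.getD i 0 = s.getD i 0
      · rw [if_pos hci]
        exact ih (i + 1) c (by omega) hclen hcnt
          (take_succ_eq c s i (by omega) (by omega) htake hci) hprev'
      · rw [if_neg hci]
        -- the scan finds some in-range target holding the wanted value
        have hji : i < j := by
          rcases Nat.eq_or_lt_of_le hij with h | h
          · exact absurd (h ▸ hjv) hci
          · exact h
        have hdvd : k.toNat ∣ j - i := by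
          have : i % k.toNat = j % k.toNat := hjr.symm
          exact (Nat.modEq_iff_dvd' (by omega)).1 this
        obtain ⟨t, ht⟩ := hdvd
        rw [Nat.mul_comm] at ht
        have ht1 : 1 ≤ t := by
          rcases Nat.eq_zero_or_pos t with h | h
          · subst h
            simp at ht
            omega
          · exact h
        have hmul0 : k.toNat ≤ t * k.toNat := Nat.le_mul_of_pos_left _ ht1
        have hjt : j = i + t * k.toNat := by omega
        have htM : (t : Int) ≤ PySem.Int.floordiv ((arr.length : Int) - (i : Int)) k := by
          rw [PySem.Int.le_floordiv_iff_mul_le hk]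
          have : (t : Int) * k = ((t * k.toNat : Nat) : Int) := by
            push_cast
            rw [hkk]
          rw [this]
          omega
        have htmem : (t : Int) ∈ PySem.List.pyRange 1
            (PySem.Int.floordiv ((arr.length : Int) - (i : Int)) k + 1) 1 := by
          rw [PySem.List.mem_pyRange_one]
          constructor
          · exact_mod_cast ht1
          · omega
        have htval : PySem.List.pyGetD c ((i : Int) + (t : Int) * k) 0 = s.getD i 0 := by
          have harg : (i : Int) + (t : Int) * k = ((i + t * k.toNat : Nat) : Int) := by
            push_cast
            rw [hkk]
          rw [harg, PySem.List.pyGetD_natCast, ← hjt, hjv]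
        obtain ⟨j', hj'mem, hj'le, hres, hval⟩ :=
          kSwapFind_first c (s.getD i 0) (i : Int) k _
            (PySem.List.pairwise_lt_pyRange_one _ _) (t : Int) htmem htval
        rw [hres]
        have hj'1 : 1 ≤ j' := (PySem.List.mem_pyRange_one.1 hj'mem).1
        have hm1 : 1 ≤ j'.toNat := by omega
        -- rewrite the target in the (m+1) shape of swapToTgt_spec
        have harg : (i : Int) + j' * k
            = (i : Int) + (((j'.toNat - 1 : Nat) : Int) + 1) * k := by
          have : (((j'.toNat - 1 : Nat) : Int) + 1) = j' := by push_cast; omega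
          rw [this]
        have hlenbound : i + (j'.toNat - 1 + 1) * k.toNat < c.length := by
          have h1 : j'.toNat ≤ t := by omega
          have h2 : j'.toNat - 1 + 1 = j'.toNat := by omega
          rw [h2]
          have h3 : j'.toNat * k.toNat ≤ t * k.toNat :=
            Nat.mul_le_mul_right _ h1
          omega
        obtain ⟨L1, C1, T1, G1⟩ := swapToTgt_spec k hk (j'.toNat - 1) c i hlenbound
        rw [harg]
        have hdval : (swapToTgt c (i : Int)
            ((i : Int) + (((j'.toNat - 1 : Nat) : Int) + 1) * k) k).getD i 0 = s.getD i 0 := by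
          rw [G1]
          have harg2 : (i : Int) + j' * k = ((i + (j'.toNat - 1 + 1) * k.toNat : Nat) : Int) := by
            rw [show j'.toNat - 1 + 1 = j'.toNat from by omega]
            push_cast
            rw [Int.toNat_of_nonneg (by omega : (0:Int) ≤ j'), hkk]
          rw [harg2, PySem.List.pyGetD_natCast] at hval
          exact hval
        apply ih (i + 1) _ (by omega) (by rw [L1, hclen]) ?_ ?_ hprev'
        · intro r v
          rw [L1, C1]
          exact hcnt r v
        · exact take_succ_eq _ s i (by rw [L1]; omega) (by omega)
            (by rw [T1]; exact htake) (by rw [hdval])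

lemma range_filter_mod (K r : Nat) (hK : 0 < K) (hr : r < K) :
    ∀ (n c : Nat), (∀ t, t < c ↔ r + t * K < n) →
    (List.range n).filter (fun j => j % K == r) = (List.range c).map (fun t => r + t * K) := by
  intro n
  induction n with
  | zero =>
    intro c hc
    have hc0 : c = 0 := by
      by_contra h
      have := (hc 0).1 (by omega)
      omega
    subst hc0
    rfl
  | succ n ih =>
    intro c hc
    rw [List.range_succ, List.filter_append]
    by_cases hn : n % K = r
    · -- n itself is a class-r position
      have hrn : r ≤ n := hn ▸ Nat.mod_le n K
      have ht0 : n = r + (n / K) * K := by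
        have h1 := Nat.div_add_mod n K
        have h2 : K * (n / K) = (n / K) * K := Nat.mul_comm _ _
        omega
      have hprop : ∀ t, t < n / K ↔ r + t * K < n := by
        intro t
        constructor
        · intro h
          have h2 : t * K + K ≤ (n / K) * K := by
            have := Nat.mul_le_mul_right K (show t + 1 ≤ n / K by omega)
            calc t * K + K = (t + 1) * K := by ring
              _ ≤ (n / K) * K := this
          omega
        · intro h
          have h2 : t * K < (n / K) * K := by omega
          exact Nat.lt_of_mul_lt_mul_right h2
      have hceq : c = n / K + 1 := by
        have h1 : n / K < c := (hc (n / K)).2 (by omega)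
        by_contra h
        have h2 : n / K + 1 < c := by omega
        have := (hc (n / K + 1)).1 h2
        have : (n / K + 1) * K = (n / K) * K + K := by ring
        omega
      rw [ih (n / K) hprop, hceq, List.range_succ, List.map_append]
      simp [hn]
      omega
    · -- n is not in class r
      have hprop : ∀ t, t < c ↔ r + t * K < n := by
        intro t
        rw [hc t]
        constructor
        · intro h
          rcases Nat.lt_succ_iff_lt_or_eq.1 h with h2 | h2
          · exact h2
          · exfalso
            apply hn
            rw [← h2, Nat.add_mul_mod_self_right, Nat.mod_eq_of_lt hr]
        · omega
      rw [ih c hprop]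
      simp [hn]

lemma slice_class (xs : List Int) (k r : Int) (hk : 0 < k) (hr : 0 ≤ r)
    (hrk : r < k) (hrn : r < (xs.length : Int)) :
    (PySem.List.slice? xs (some r) none k).getD []
      = ((List.range xs.length).filter (fun j => j % k.toNat == r.toNat)).map
          (fun j => xs.getD j 0) := by
  have hkk : ((k.toNat : Nat) : Int) = k := Int.toNat_of_nonneg (by omega)
  have hrr : ((r.toNat : Nat) : Int) = r := Int.toNat_of_nonneg hr
  have hKpos : 0 < k.toNat := by omega
  have hrn' : r.toNat < xs.length := by omega
  have hidx : PySem.List.sliceIndices xs.length (some r) none k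
      = (r, (xs.length : Int), k) := by
    unfold PySem.List.sliceIndices
    simp only [if_neg (show ¬ k < 0 from by omega), if_neg (show ¬ r < 0 from by omega),
      min_eq_left (show r ≤ (xs.length : Int) from by omega)]
  have hcnt' : ((xs.length : Int) - r + k - 1) / k
      = (((xs.length - r.toNat + k.toNat - 1) / k.toNat : Nat) : Int) := by
    have h1 : (xs.length : Int) - r + k - 1
        = ((xs.length - r.toNat + k.toNat - 1 : Nat) : Int) := by omega
    rw [h1, Int.natCast_ediv, hkk]
  have hchar : ∀ t : Nat, t < (xs.length - r.toNat + k.toNat - 1) / k.toNat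
      ↔ r.toNat + t * k.toNat < xs.length := by
    intro t
    have hexp : (t + 1) * k.toNat = t * k.toNat + k.toNat := by ring
    rw [show (t < (xs.length - r.toNat + k.toNat - 1) / k.toNat)
        = (t + 1 ≤ (xs.length - r.toNat + k.toNat - 1) / k.toNat) from rfl,
      Nat.le_div_iff_mul_le hKpos]
    omega
  unfold PySem.List.slice?
  rw [if_neg (by omega : ¬ k = 0), hidx]
  simp only
  rw [if_pos hk, if_pos (by omega : r < (xs.length : Int)), hcnt', Int.toNat_natCast]
  rw [List.filterMap_congr (g := some ∘ (fun t : Nat => xs.getD (r.toNat + t * k.toNat) 0)) ?_]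
  · rw [List.filterMap_eq_map,
      range_filter_mod k.toNat r.toNat hKpos (by omega : r.toNat < k.toNat) xs.length
        ((xs.length - r.toNat + k.toNat - 1) / k.toNat) hchar,
      List.map_map]
    rfl
  · intro t ht
    have ht' := (hchar t).1 (List.mem_range.1 ht)
    have harg : (r + k * (t : Int)).toNat = r.toNat + t * k.toNat := by
      have h2 : k * (t : Int) = ((t * k.toNat : Nat) : Int) := by
        push_cast
        rw [hkk]
        ring
      rw [h2]
      omega
    rw [harg]
    simp [List.getElem?_eq_getElem ht', List.getD_eq_getElem xs 0 ht']

lemma class_count (xs : List Int) (K r : Nat) (v : Int) :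
    (((List.range xs.length).filter (fun j => j % K == r)).map (fun j => xs.getD j 0)).count v
      = cntK xs K r v xs.length := by
  rw [List.count_eq_countP, List.countP_map, cntK, List.countP_filter]
  apply List.countP_congr
  intro j hj
  simp [Function.comp, Bool.and_comm]

lemma class_sorted (arr : List Int) (K r : Nat) :
    (((List.range (PySem.List.sorted arr (fun x => x) false).length).filter
        (fun j => j % K == r)).map
        (fun j => (PySem.List.sorted arr (fun x => x) false).getD j 0)).Pairwise (· ≤ ·) := by
  rw [List.pairwise_map]
  apply List.Pairwise.imp_of_mem ?_ ((List.pairwise_lt_range).filter _)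
  intro a b ha hb hab
  have ha' := List.mem_range.1 (List.mem_of_mem_filter ha)
  have hb' := List.mem_range.1 (List.mem_of_mem_filter hb)
  rw [List.getD_eq_getElem _ 0 ha', List.getD_eq_getElem _ 0 hb']
  exact PySem.List.sorted_id_getElem_mono arr (le_of_lt hab) hb'

lemma class_eq_iff (arr s : List Int) (K r : Nat)
    (hs : s = PySem.List.sorted arr (fun x => x) false)
    (hlen : s.length = arr.length) :
    (PySem.List.sorted (((List.range arr.length).filter (fun j => j % K == r)).map
        (fun j => arr.getD j 0)) (fun x => x) false
      = ((List.range arr.length).filter (fun j => j % K == r)).map (fun j => s.getD j 0))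
    ↔ ∀ v, cntK arr K r v arr.length = cntK s K r v s.length := by
  have hrange : ((List.range arr.length).filter (fun j => j % K == r)).map
        (fun j => s.getD j 0)
      = ((List.range s.length).filter (fun j => j % K == r)).map (fun j => s.getD j 0) := by
    rw [hlen]
  constructor
  · intro heq v
    have hperm : (((List.range arr.length).filter (fun j => j % K == r)).map
        (fun j => s.getD j 0)).Perm
        (((List.range arr.length).filter (fun j => j % K == r)).map (fun j => arr.getD j 0)) := by
      rw [← heq]
      exact PySem.List.sorted_perm _ _ _
    have hcc := hperm.count_eq v
    rw [class_count arr K r v, hrange, class_count s K r v] at hcc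
    exact hcc.symm
  · intro hcnt
    have hperm : (((List.range arr.length).filter (fun j => j % K == r)).map
        (fun j => s.getD j 0)).Perm
        (((List.range arr.length).filter (fun j => j % K == r)).map (fun j => arr.getD j 0)) := by
      rw [List.perm_iff_count]
      intro v
      rw [class_count arr K r v]
      rw [hrange, class_count s K r v, hcnt]
    have hpw : (((List.range arr.length).filter (fun j => j % K == r)).map
        (fun j => s.getD j 0)).Pairwise (· ≤ ·) := by
      have := class_sorted arr K r
      rw [← hs, hlen] at this
      exact this
    exact PySem.List.sorted_id_eq_of_perm_of_pairwise _ _ hperm hpw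

lemma fails_iff_counts (arr s : List Int) (K : Nat) (hK : 0 < K)
    (hs : s = PySem.List.sorted arr (fun x => x) false) (hlen : s.length = arr.length) :
    (∀ i < arr.length, failsB arr s K i = false)
      ↔ (∀ r v, cntK s K r v s.length = cntK arr K r v arr.length) := by
  constructor
  · intro hnofail
    apply cnt_eq_of_le arr s K hlen
    intro r v
    by_cases hz : cntK s K r v s.length = 0
    · omega
    · -- take the greatest class-r position of s holding v
      have hex : ∃ j, j ≤ s.length - 1 ∧ (j % K = r ∧ s.getD j 0 = v) := by
        by_contra hcon
        apply hz
        rw [cntK_stable s K r v 0 s.length (by omega) ?_]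
        · simp [cntK]
        · intro j h1 h2 hc
          exact hcon ⟨j, by omega, hc⟩
      obtain ⟨j0, hj0le, hj0P⟩ := hex
      have hlen1 : 1 ≤ s.length := by
        by_contra hcon
        apply hz
        have : s.length = 0 := by omega
        rw [this]
        simp [cntK]
      have hgP := Nat.findGreatest_spec (P := fun j => j % K = r ∧ s.getD j 0 = v) hj0le hj0P
      have hgle := Nat.findGreatest_le (P := fun j => j % K = r ∧ s.getD j 0 = v) (s.length - 1)
      have hstable : cntK s K r v s.length
          = cntK s K r v (Nat.findGreatest (fun j => j % K = r ∧ s.getD j 0 = v) (s.length - 1) + 1) :=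
        cntK_stable s K r v _ s.length (by omega)
          (fun j hj1 hj2 => Nat.findGreatest_is_greatest
            (P := fun j => j % K = r ∧ s.getD j 0 = v) (n := s.length - 1) (by omega) (by omega))
      have hsucc : cntK s K r v
            (Nat.findGreatest (fun j => j % K = r ∧ s.getD j 0 = v) (s.length - 1) + 1)
          = cntK s K r v (Nat.findGreatest (fun j => j % K = r ∧ s.getD j 0 = v) (s.length - 1)) + 1 := by
        rw [cntK_succ, if_pos hgP]
      have hnf := hnofail (Nat.findGreatest (fun j => j % K = r ∧ s.getD j 0 = v) (s.length - 1))
        (by omega)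
      rw [failsB, hgP.1, hgP.2] at hnf
      simp only [decide_eq_false_iff_not, Nat.not_lt] at hnf
      have hm := cntK_mono s K r v (show
        Nat.findGreatest (fun j => j % K = r ∧ s.getD j 0 = v) (s.length - 1) + 1 ≤ s.length by omega)
      omega
  · intro hcnt i hi
    have h1 : cntK s K (i % K) (s.getD i 0) (i + 1)
        ≤ cntK s K (i % K) (s.getD i 0) s.length := cntK_mono _ _ _ _ (by omega)
    have h2 := hcnt (i % K) (s.getD i 0)
    rw [failsB]
    simp only [decide_eq_false_iff_not, Nat.not_lt]
    omega

lemma cntK_zero_big (xs : List Int) (K r : Nat) (v : Int) (m : Nat)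
    (hm : m ≤ r) (hrK : r < K) : cntK xs K r v m = 0 := by
  unfold cntK
  rw [List.countP_eq_zero]
  intro j hj
  have hj' := List.mem_range.1 hj
  have : j % K = j := Nat.mod_eq_of_lt (by omega)
  simp only [Bool.and_eq_true, beq_iff_eq, not_and]
  intro h
  omega

lemma getD_ext (c s : List Int) (hlen : c.length = s.length)
    (h : ∀ j < s.length, c.getD j 0 = s.getD j 0) : c = s := by
  apply List.ext_getElem hlen
  intro j h1 h2
  have := h j h2
  rwa [List.getD_eq_getElem c 0 h1, List.getD_eq_getElem s 0 h2] at this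


lemma alt_cond_iff (arr : List Int) (k : Int) (hk : 0 < k) :
    ((PySem.List.pyRange 0 (min k (arr.length : Int)) 1).all (fun r =>
        PySem.List.sorted ((PySem.List.slice? arr (some r) none k).getD []) (fun x => x) false
          == (PySem.List.slice? (PySem.List.sorted arr (fun x => x) false)
                (some r) none k).getD []) = true)
    ↔ (∀ r v, cntK (PySem.List.sorted arr (fun x => x) false) k.toNat r v
          (PySem.List.sorted arr (fun x => x) false).length
        = cntK arr k.toNat r v arr.length) := by
  have hlen : (PySem.List.sorted arr (fun x => x) false).length = arr.length :=
    PySem.List.length_sorted arr _ _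
  have hKpos : 0 < k.toNat := by omega
  rw [List.all_eq_true]
  constructor
  · intro H r v
    by_cases hr1 : r < k.toNat
    · by_cases hr2 : r < arr.length
      · have hmem : ((r : Nat) : Int) ∈ PySem.List.pyRange 0 (min k (arr.length : Int)) 1 := by
          rw [PySem.List.mem_pyRange_one]
          constructor
          · omega
          · rw [lt_min_iff]
            omega
        have hp := H _ hmem
        rw [beq_iff_eq] at hp
        rw [slice_class arr k (r : Int) hk (by omega) (by omega) (by omega)] at hp
        rw [slice_class (PySem.List.sorted arr (fun x => x) false) k (r : Int) hk
          (by omega) (by omega) (by omega)] at hp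
        simp only [Int.toNat_natCast] at hp
        rw [hlen] at hp
        exact ((class_eq_iff arr _ k.toNat r rfl hlen).1 hp v).symm
      · rw [cntK_zero_big _ _ _ _ _ (by omega) hr1, cntK_zero_big _ _ _ _ _ (by omega) hr1]
    · rw [cntK_high _ _ _ _ _ hKpos (by omega), cntK_high _ _ _ _ _ hKpos (by omega)]
  · intro HQ x hx
    rw [PySem.List.mem_pyRange_one] at hx
    have hx0 : 0 ≤ x := hx.1
    have hxm := lt_min_iff.1 hx.2
    rw [beq_iff_eq]
    rw [slice_class arr k x hk hx0 hxm.1 hxm.2]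
    rw [slice_class (PySem.List.sorted arr (fun x => x) false) k x hk hx0 hxm.1 (by omega)]
    rw [hlen]
    exact (class_eq_iff arr _ k.toNat x.toNat rfl hlen).2 (fun v => (HQ x.toNat v).symm)

-- ===== VERDICT (by name: the statement is the Claim_ definition above) =====
theorem k_swap_spec : Claim_equal_k_swap := by
  unfold Claim_equal_k_swap
  intro arr k _ hpre
  unfold Spec_k_swap
  obtain ⟨hpre0, hprepos⟩ := hpre
  have hlen : (PySem.List.sorted arr (fun x => x) false).length = arr.length :=
    PySem.List.length_sorted arr _ _
  unfold k_swap
  simp only [k_swap_alt]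
  rcases lt_trichotomy k 0 with hk | hk | hk
  · -- k < 0: A can never swap; both sides test sortedness
    rw [kSwapGo_neg k hk ((arr.length : Int)) _ arr.length 0 arr (by omega)]
    rw [if_pos (show k ≤ 0 by omega)]
    have hiff : (∀ j < ((arr.length : Int)).toNat, 0 ≤ j →
          arr.getD j 0 = (PySem.List.sorted arr (fun x => x) false).getD j 0)
        ↔ arr = PySem.List.sorted arr (fun x => x) false := by
      constructor
      · intro H
        exact getD_ext _ _ hlen.symm (fun j hj => H j (by omega) (by omega))
      · intro H j hj h0
        rw [← H]
    exact if_congr hiff rfl rfl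
  · -- k = 0: Pre_ guarantees arr is already sorted
    have hs' : PySem.List.sorted arr (fun x => x) false = arr := hpre0 hk
    rw [hs']
    rw [kSwapGo_self k ((arr.length : Int)) arr arr.length 0 (by omega)]
    rw [if_pos (show k ≤ 0 by omega), if_pos rfl]
  · -- 0 < k: the main case
    rw [if_neg (show ¬ k ≤ 0 by omega)]
    rw [kSwapGo_spec k hk arr (PySem.List.sorted arr (fun x => x) false) hlen
      (hprepos hk) arr.length 0 arr (by omega) rfl (fun r v => rfl) (by simp)
      (fun i' hi' => by omega)]
    have h1 := fails_iff_counts arr (PySem.List.sorted arr (fun x => x) false) k.toNat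
      (by omega) rfl hlen
    have h2 := alt_cond_iff arr k hk
    exact if_congr (h1.trans h2.symm) rfl rfl
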